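-- pv_equiv track=rewrite | github.com/Xu60069/pythonApp | codechef/201709/GoodPermutation.py | goodPermuEven
-- ===== SOURCE A (Python) =====
-- def goodPermuEven(n):
--     arr=[]
--     for i in range(1,n+1):
--         if i%2==1:
--             arr.append(2*(i//2+1))
--         else:
--             arr.append(2*(i//2)-1)
--     return arr
-- ===== SOURCE B (Python) =====
-- def goodPermuEven(n):
--     # emit swapped pairs (2k+2, 2k+1) directly, two per step; lone high element when n is odd
--     arr = []
--     for k in range((n + 1) // 2):
--         arr.append(2 * k + 2)
--         if 2 * k + 2 <= n:
--             arr.append(2 * k + 1)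
--     return arr
-- ===== Notes on version B (the rewrite author's own statement) =====
-- stated objective: alternative
-- what changed: B loops over half as many indices, one per adjacent pair, emitting the pair's high element and then its low element (guarded for the lone trailing element when n is odd), instead of A's one-element-per-index loop with an even/odd branch and halving arithmetic.
import Mathlib
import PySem

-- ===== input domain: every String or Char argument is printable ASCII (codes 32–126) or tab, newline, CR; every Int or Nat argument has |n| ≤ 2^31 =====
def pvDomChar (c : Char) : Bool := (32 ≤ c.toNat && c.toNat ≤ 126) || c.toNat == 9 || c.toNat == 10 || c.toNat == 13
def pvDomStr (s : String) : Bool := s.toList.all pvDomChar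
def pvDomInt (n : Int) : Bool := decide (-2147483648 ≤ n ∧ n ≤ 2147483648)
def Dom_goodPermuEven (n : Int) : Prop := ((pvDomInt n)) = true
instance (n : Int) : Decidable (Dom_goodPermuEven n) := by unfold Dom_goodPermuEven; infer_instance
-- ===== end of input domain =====

-- B emits swapped pairs two-at-a-time over (n+1)//2 pair indices instead of A's
-- per-index loop with an even/odd branch (objective: alternative decomposition).

-- ===== PORT A =====
def goodPermuEven (n : Int) : List Int :=
  (PySem.List.pyRange 1 (n + 1) 1).foldl
    (fun arr i =>
      if PySem.Int.mod i 2 = 1 then arr ++ [2 * (PySem.Int.floordiv i 2 + 1)]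
      else arr ++ [2 * (PySem.Int.floordiv i 2) - 1]) []

-- ===== PORT B =====
def goodPermuEven_alt (n : Int) : List Int :=
  (PySem.List.pyRange 0 (PySem.Int.floordiv (n + 1) 2) 1).foldl
    (fun arr k =>
      let arr := arr ++ [2 * k + 2]
      if 2 * k + 2 ≤ n then arr ++ [2 * k + 1] else arr) []

-- ===== PRECONDITION & SPEC =====
def Spec_goodPermuEven (n : Int) (out : List Int) : Prop := out = goodPermuEven_alt n
instance (n : Int) (out : List Int) : Decidable (Spec_goodPermuEven n out) := by unfold Spec_goodPermuEven; infer_instance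

-- ===== CLAIM (what is proved, stated in full; the proofs are below) =====
def Claim_equal_goodPermuEven : Prop := ∀ (n : Int), Dom_goodPermuEven n → Spec_goodPermuEven n (goodPermuEven n)

-- ===== LEMMAS AND PROOFS =====

-- the per-index element A appends, and the per-pair chunk B appends
def fA (i : Int) : Int :=
  if PySem.Int.mod i 2 = 1 then 2 * (PySem.Int.floordiv i 2 + 1)
  else 2 * (PySem.Int.floordiv i 2) - 1

def gB (n k : Int) : List Int :=
  if 2 * k + 2 ≤ n then [2 * k + 2, 2 * k + 1] else [2 * k + 2]

lemma md2 (a : Int) : PySem.Int.mod a 2 = a % 2 := PySem.Int.mod_eq_emod_of_pos (by omega)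
lemma fd2 (a : Int) : PySem.Int.floordiv a 2 = a / 2 := PySem.Int.floordiv_eq_ediv_of_pos (by omega)

lemma gpA_eq_map (n : Int) : goodPermuEven n = (PySem.List.pyRange 1 (n + 1) 1).map fA := by
  unfold goodPermuEven
  rw [show (fun (arr : List Int) i =>
        if PySem.Int.mod i 2 = 1 then arr ++ [2 * (PySem.Int.floordiv i 2 + 1)]
        else arr ++ [2 * (PySem.Int.floordiv i 2) - 1]) =
      (fun arr i => arr ++ [fA i]) from by
    funext arr i; unfold fA; split_ifs <;> rfl]
  rw [PySem.List.foldl_append_singleton_eq_map]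
  simp

lemma gpB_eq_flatMap (n : Int) :
    goodPermuEven_alt n =
      (PySem.List.pyRange 0 (PySem.Int.floordiv (n + 1) 2) 1).flatMap (gB n) := by
  unfold goodPermuEven_alt
  rw [show (fun (arr : List Int) k =>
        let arr := arr ++ [2 * k + 2]
        if 2 * k + 2 ≤ n then arr ++ [2 * k + 1] else arr) =
      (fun arr k => arr ++ gB n k) from by
    funext arr k; unfold gB; simp only []; split_ifs <;> simp]
  rw [PySem.List.foldl_append_eq_flatMap]
  simp

-- full pair prefix: the first j pairs agree as long as 2*j ≤ n
lemma gp_pref (n : Int) (j : Nat) (h : 2 * (j : Int) ≤ n) :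
    (PySem.List.pyRange 1 (2 * (j : Int) + 1) 1).map fA =
      (PySem.List.pyRange 0 (j : Int) 1).flatMap (gB n) := by
  induction j with
  | zero =>
      push_cast
      rw [PySem.List.pyRange_one_eq_nil (show (1:Int) ≤ 1 by omega),
          PySem.List.pyRange_one_eq_nil (show (0:Int) ≤ 0 by omega)]
      simp
  | succ j ih =>
      push_cast at h ⊢
      rw [show 2 * ((j : Int) + 1) + 1 = (2 * (j : Int) + 1 + 1) + 1 from by ring,
          PySem.List.pyRange_one_succ_right (show (1:Int) ≤ 2 * (j : Int) + 1 + 1 by omega),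
          PySem.List.pyRange_one_succ_right (show (1:Int) ≤ 2 * (j : Int) + 1 by omega),
          PySem.List.pyRange_one_succ_right (show (0:Int) ≤ (j : Int) by omega)]
      simp only [List.map_append, List.flatMap_append, List.map_cons, List.map_nil,
        List.flatMap_cons, List.flatMap_nil, List.append_assoc]
      rw [ih (by omega)]
      congr 1
      unfold fA gB
      simp only [md2, fd2]
      rw [if_pos (by omega), if_neg (by omega), if_pos (by omega)]
      simp only [List.append_nil, List.cons_append, List.nil_append, List.cons.injEq]
      exact ⟨by omega, by omega, trivial⟩

lemma gp_neg (n : Int) (h : n ≤ 0) : goodPermuEven n = goodPermuEven_alt n := by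
  rw [gpA_eq_map, gpB_eq_flatMap,
      PySem.List.pyRange_one_eq_nil (show n+1 ≤ 1 by omega),
      PySem.List.pyRange_one_eq_nil (show PySem.Int.floordiv (n+1) 2 ≤ 0 by rw [fd2]; omega)]
  simp

-- ===== VERDICT =====
theorem goodPermuEven_spec : Claim_equal_goodPermuEven := by
  intro n _
  unfold Spec_goodPermuEven
  by_cases h : n ≤ 0
  · exact gp_neg n h
  · rw [gpA_eq_map, gpB_eq_flatMap, fd2]
    rcases Int.even_or_odd n with ⟨j, hj⟩ | ⟨j, hj⟩
    · -- n = 2j even: all pairs are full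
      have hj' : n = 2 * ((j.toNat : Nat) : Int) := by omega
      rw [show (n + 1) / 2 = ((j.toNat : Nat) : Int) from by omega,
          show n + 1 = 2 * ((j.toNat : Nat) : Int) + 1 from by omega]
      exact gp_pref n j.toNat (by omega)
    · -- n = 2j+1 odd: j full pairs, then the lone element n+1
      have hj' : n = 2 * ((j.toNat : Nat) : Int) + 1 := by omega
      rw [show (n + 1) / 2 = ((j.toNat : Nat) : Int) + 1 from by omega,
          show n + 1 = (2 * ((j.toNat : Nat) : Int) + 1) + 1 from by omega,
          PySem.List.pyRange_one_succ_right (show (1:Int) ≤ 2 * ((j.toNat : Nat) : Int) + 1 by omega),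
          PySem.List.pyRange_one_succ_right (show (0:Int) ≤ ((j.toNat : Nat) : Int) by omega)]
      simp only [List.map_append, List.flatMap_append, List.map_cons, List.map_nil,
        List.flatMap_cons, List.flatMap_nil]
      rw [gp_pref n j.toNat (by omega)]
      congr 1
      unfold fA gB
      simp only [md2, fd2]
      rw [if_pos (by omega), if_neg (by omega)]
      simp only [List.append_nil, List.cons.injEq, and_true]
      omega
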